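-- pv_equiv track=rewrite | github.com/Fahrimuh21/tugas-set | set1.py | IsNimMemberSetMhs
-- ===== SOURCE A (Python) =====
-- def Tail(L):
--     return L[1:]
--
-- def FirstElmt(L):
--     return L[0]
--
-- def SelectNIM(Mhs):
--     return Mhs[0]
--
-- def IsEmpty(L):
--     return L == [] or L == [[]]
--
-- def IsNimMemberSetMhs(nim, SetMhs):
--     if IsEmpty(SetMhs):
--         return False
--     else:
--         if nim == SelectNIM(FirstElmt(SetMhs)):
--             return True
--         else:
--             return IsNimMemberSetMhs(nim, Tail(SetMhs))
-- ===== SOURCE B (Python) =====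
-- def IsNimMemberSetMhs(nim, SetMhs):
--     return any(mhs and mhs[0] == nim for mhs in SetMhs)
-- ===== Notes on version B (the rewrite author's own statement) =====
-- stated objective: simpler
-- what changed: Replaces the tail recursion with sentinel helpers (IsEmpty/FirstElmt/SelectNIM/Tail) by a single any() scan that skips empty records, so B is one line and total.
import Mathlib
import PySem

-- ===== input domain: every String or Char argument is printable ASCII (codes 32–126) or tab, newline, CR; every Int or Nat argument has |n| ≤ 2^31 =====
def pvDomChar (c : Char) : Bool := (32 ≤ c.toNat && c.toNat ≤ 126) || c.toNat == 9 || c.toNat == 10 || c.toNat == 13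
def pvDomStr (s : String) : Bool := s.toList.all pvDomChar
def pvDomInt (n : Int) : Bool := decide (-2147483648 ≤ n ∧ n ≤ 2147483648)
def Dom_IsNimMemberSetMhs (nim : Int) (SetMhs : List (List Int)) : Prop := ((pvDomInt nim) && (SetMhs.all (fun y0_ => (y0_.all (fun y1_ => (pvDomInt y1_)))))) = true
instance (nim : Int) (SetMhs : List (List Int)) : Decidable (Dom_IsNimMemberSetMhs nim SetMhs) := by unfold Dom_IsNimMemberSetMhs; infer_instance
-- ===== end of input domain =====

-- B replaces A's tail recursion over sentinel helpers by a single total any() scan (objective: simpler).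

-- ===== PORT A =====
-- IsEmpty(L): L == [] or L == [[]]
def pvIsEmptyA (L : List (List Int)) : Bool := L == ([] : List (List Int)) || L == [([] : List Int)]

def IsNimMemberSetMhs (nim : Int) (SetMhs : List (List Int)) : Bool :=
  if pvIsEmptyA SetMhs then false
  else
    match SetMhs with
    | [] => false  -- unreachable: IsEmpty already returned true on []
    | mhs :: rest =>  -- FirstElmt(SetMhs) = mhs; Tail(SetMhs) = SetMhs[1:] = rest
      match PySem.List.pyGet? mhs 0 with  -- SelectNIM(Mhs) = Mhs[0]
      | none => false  -- Python raises IndexError here; excluded by Pre_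
      | some h => if nim == h then true else IsNimMemberSetMhs nim rest

-- ===== PORT B =====
def IsNimMemberSetMhs_alt (nim : Int) (SetMhs : List (List Int)) : Bool :=
  SetMhs.any (fun mhs =>  -- any(mhs and mhs[0] == nim for mhs in SetMhs)
    match mhs with
    | [] => false          -- `mhs` falsy
    | h :: _ => h == nim)  -- mhs[0] == nim

-- ===== PRECONDITION & SPEC =====
-- A raises IndexError iff some record is empty at an index before the last, with every earlier
-- record nonempty and not headed by nim (so the scan reaches it unmatched).
def pvBad (nim : Int) (SetMhs : List (List Int)) : Prop :=
  ∃ k < SetMhs.length, k + 1 < SetMhs.length ∧ SetMhs.getD k ([] : List Int) = [] ∧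
    ∀ j < k, SetMhs.getD j ([] : List Int) ≠ [] ∧ (SetMhs.getD j ([] : List Int)).headI ≠ nim

-- Pre_ excludes exactly the inputs on which A raises IndexError.
def Pre_IsNimMemberSetMhs (nim : Int) (SetMhs : List (List Int)) : Prop := ¬ pvBad nim SetMhs
instance (nim : Int) (SetMhs : List (List Int)) : Decidable (Pre_IsNimMemberSetMhs nim SetMhs) := by
  unfold Pre_IsNimMemberSetMhs pvBad; infer_instance

def pvWitness_IsNimMemberSetMhs : Int × List (List Int) := (2, [[1, 7], [2, 8], [3]])

def Spec_IsNimMemberSetMhs (nim : Int) (SetMhs : List (List Int)) (out : Bool) : Prop := out = IsNimMemberSetMhs_alt nim SetMhs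
instance (nim : Int) (SetMhs : List (List Int)) (out : Bool) : Decidable (Spec_IsNimMemberSetMhs nim SetMhs out) := by unfold Spec_IsNimMemberSetMhs; infer_instance

-- ===== CLAIM (what is proved, stated in full; the proofs are below) =====
def Claim_equal_IsNimMemberSetMhs : Prop := ∀ (nim : Int) (SetMhs : List (List Int)), Dom_IsNimMemberSetMhs nim SetMhs → Pre_IsNimMemberSetMhs nim SetMhs → Spec_IsNimMemberSetMhs nim SetMhs (IsNimMemberSetMhs nim SetMhs)
-- ===== LEMMAS AND PROOFS =====

-- pvBad on a cons with nonempty head not matching nim lifts from the tail.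
lemma pvBad_cons (nim h : Int) (t : List Int) (rest : List (List Int))
    (hne : nim ≠ h) (hb : pvBad nim rest) : pvBad nim ((h :: t) :: rest) := by
  obtain ⟨k, hk, hk1, hget, hall⟩ := hb
  refine ⟨k + 1, by simpa using Nat.succ_lt_succ hk, by simpa using Nat.succ_lt_succ hk1, by simpa using hget, ?_⟩
  intro j hj
  cases j with
  | zero => exact ⟨by simp, by simpa using fun h' => hne h'.symm⟩
  | succ j' =>
    have := hall j' (by omega)
    simpa using this

theorem IsNimMemberSetMhs_spec : Claim_equal_IsNimMemberSetMhs := by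
  intro nim SetMhs hdom hpre
  unfold Spec_IsNimMemberSetMhs
  induction SetMhs with
  | nil => rfl
  | cons mhs rest ih =>
    have hdom' : Dom_IsNimMemberSetMhs nim rest := by
      simp only [Dom_IsNimMemberSetMhs, List.all_cons, Bool.and_eq_true] at hdom ⊢
      exact ⟨hdom.1, hdom.2.2⟩
    cases mhs with
    | nil =>
      cases rest with
      | nil => rfl
      | cons r rs =>
        exact absurd ⟨0, by simp, by simp, by simp, by omega⟩ hpre
    | cons h t =>
      by_cases hnim : nim = h
      · subst hnim
        simp [IsNimMemberSetMhs, IsNimMemberSetMhs_alt, pvIsEmptyA,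
          PySem.List.pyGet?, PySem.List.pyIdx?]
      · have hpre' : Pre_IsNimMemberSetMhs nim rest := fun hb => hpre (pvBad_cons nim h t rest hnim hb)
        have hrec := ih hdom' hpre'
        simp [IsNimMemberSetMhs, IsNimMemberSetMhs_alt, pvIsEmptyA,
          PySem.List.pyGet?, PySem.List.pyIdx?, hnim, Ne.symm hnim, hrec,
          IsNimMemberSetMhs_alt] at hrec ⊢
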